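-- pv_equiv track=rewrite | github.com/vbetsch/undercover | app/src/core/Inspector.py | same_first_letter_without_case
-- ===== SOURCE A (Python) =====
-- def same_first_letter_without_case(words):
--     first_letters = []
--     for word in words:
--         first_letters.append(word[0])
--     if len(first_letters) != len(set(first_letters)):
--         return True
--     else:
--         return False
-- ===== SOURCE B (Python) =====
-- def same_first_letter_without_case(words):
--     letters = []
--     for word in words:
--         letters.append(word[0])
--     letters.sort()
--     for a, b in zip(letters, letters[1:]):
--         if a == b:
--             return True
--     return False
-- ===== Notes on version B (the rewrite author's own statement) =====
-- stated objective: alternative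
-- what changed: Replaces the set-size comparison with sorting the first letters and scanning once for an adjacent equal pair.
import Mathlib
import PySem

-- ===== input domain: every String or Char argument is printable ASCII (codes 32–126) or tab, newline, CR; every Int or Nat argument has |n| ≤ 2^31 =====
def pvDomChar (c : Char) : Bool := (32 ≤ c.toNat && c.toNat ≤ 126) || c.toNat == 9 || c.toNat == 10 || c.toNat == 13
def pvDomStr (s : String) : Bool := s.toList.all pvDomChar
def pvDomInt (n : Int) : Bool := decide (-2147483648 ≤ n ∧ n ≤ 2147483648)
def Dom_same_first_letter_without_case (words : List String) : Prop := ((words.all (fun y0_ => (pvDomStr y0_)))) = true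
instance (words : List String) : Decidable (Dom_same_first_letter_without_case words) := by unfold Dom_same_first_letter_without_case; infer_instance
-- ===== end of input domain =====

-- B sorts the first letters and scans for an adjacent equal pair instead of comparing list and set sizes.

-- ===== PORT A =====
-- word[0] raises IndexError on an empty word; Pre_ excludes that, the port defaults to ' ' there.
def same_first_letter_without_case (words : List String) : Bool :=
  let first_letters : List Char :=
    words.foldl (fun acc word => acc ++ [(PySem.Str.pyGet? word 0).getD ' ']) []
  if first_letters.length ≠ (PySem.Set.ofList first_letters).length then true else false

-- ===== PORT B =====
-- the zip(letters, letters[1:]) adjacent scan of Source B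
def pvAdjDup : List Char → Bool
  | a :: b :: t => if a = b then true else pvAdjDup (b :: t)
  | _ => false

def same_first_letter_without_case_alt (words : List String) : Bool :=
  let letters : List Char :=
    words.foldl (fun acc word => acc ++ [(PySem.Str.pyGet? word 0).getD ' ']) []
  pvAdjDup (PySem.List.sorted letters (fun x => x) false)

-- ===== PRECONDITION & SPEC =====
-- Pre_ excludes lists containing an empty word, on which Python's word[0] raises IndexError (in A and in B alike).
def Pre_same_first_letter_without_case (words : List String) : Prop :=
  (words.all (fun w => w ≠ "")) = true
instance (words : List String) : Decidable (Pre_same_first_letter_without_case words) := by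
  unfold Pre_same_first_letter_without_case; infer_instance

def pvWitness_same_first_letter_without_case : List String := ["ab", "cd", "Ax"]

def Spec_same_first_letter_without_case (words : List String) (out : Bool) : Prop := out = same_first_letter_without_case_alt words
instance (words : List String) (out : Bool) : Decidable (Spec_same_first_letter_without_case words out) := by unfold Spec_same_first_letter_without_case; infer_instance

-- ===== CLAIM (what is proved, stated in full; the proofs are below) =====
def Claim_equal_same_first_letter_without_case : Prop := ∀ (words : List String), Dom_same_first_letter_without_case words → Pre_same_first_letter_without_case words → Spec_same_first_letter_without_case words (same_first_letter_without_case words)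

-- ===== LEMMAS AND PROOFS =====

-- length of set(l) equals length of l iff l has no duplicates
theorem pv_ofList_len_iff {α : Type} [DecidableEq α] (l : List α) :
    (PySem.Set.ofList l).length = l.length ↔ l.Nodup := by
  have hperm : (PySem.Set.ofList l : List α).Perm l.dedup := by
    refine (List.perm_ext_iff_of_nodup ?_ ?_).mpr ?_
    · exact PySem.Set.nodup_ofList l
    · exact l.nodup_dedup
    · intro a
      rw [PySem.Set.mem_ofList, List.mem_dedup]
  constructor
  · intro h
    have hlen : l.dedup.length = l.length := by
      rw [← hperm.length_eq, h]
    have : l.dedup = l := (List.dedup_sublist l).eq_of_length hlen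
    rw [← this]; exact l.nodup_dedup
  · intro h
    rw [hperm.length_eq, List.Nodup.dedup h]

theorem pv_chain_and {α : Type} {R S : α → α → Prop} :
    ∀ (l : List α), l.IsChain R → l.IsChain S → l.IsChain (fun a b => R a b ∧ S a b)
  | [], _, _ => List.isChain_nil
  | [a], _, _ => List.isChain_singleton a
  | _ :: _ :: _, hR, hS => by
      rw [List.isChain_cons_cons] at *
      exact ⟨⟨hR.1, hS.1⟩, pv_chain_and _ hR.2 hS.2⟩

theorem pvAdjDup_false_iff (s : List Char) :
    pvAdjDup s = false ↔ s.IsChain (· ≠ ·) := by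
  induction s with
  | nil => simp [pvAdjDup]
  | cons a t ih =>
    cases t with
    | nil => simp [pvAdjDup]
    | cons b u =>
      by_cases hab : a = b
      · simp [pvAdjDup, hab, List.isChain_cons_cons]
      · simp [pvAdjDup, hab, ih, List.isChain_cons_cons]

theorem pvAdjDup_sorted_iff (l : List Char) :
    pvAdjDup (PySem.List.sorted l (fun x => x) false) = false ↔ l.Nodup := by
  set s := PySem.List.sorted l (fun x => x) false with hs
  have hperm : s.Perm l := PySem.List.sorted_perm l (fun x => x) false
  have hle : s.Pairwise (fun a b => a ≤ b) := by
    simpa using PySem.List.sorted_pairwise l (fun x => x)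
  rw [pvAdjDup_false_iff]
  constructor
  · intro hch
    have hch2 : s.IsChain (fun a b => a ≤ b) := hle.isChain
    have hlt : s.IsChain (· < ·) := by
      exact (pv_chain_and s hch hch2).imp (fun {a b} h => lt_of_le_of_ne h.2 h.1)
    have : s.Pairwise (· < ·) := List.isChain_iff_pairwise.mp hlt
    exact hperm.nodup_iff.mp (this.imp ne_of_lt)
  · intro hnd
    have : s.Pairwise (· ≠ ·) := hperm.nodup_iff.mpr hnd
    exact this.isChain

-- ===== VERDICT (by name: the statement is the Claim_ definition above) =====
theorem same_first_letter_without_case_spec : Claim_equal_same_first_letter_without_case := by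
  intro words _ _
  unfold Spec_same_first_letter_without_case
  unfold same_first_letter_without_case same_first_letter_without_case_alt
  set letters : List Char :=
    words.foldl (fun acc word => acc ++ [(PySem.Str.pyGet? word 0).getD ' ']) [] with hl
  by_cases hnd : letters.Nodup
  · have h1 : (PySem.Set.ofList letters).length = letters.length :=
      (pv_ofList_len_iff letters).mpr hnd
    have h2 : pvAdjDup (PySem.List.sorted letters (fun x => x) false) = false :=
      (pvAdjDup_sorted_iff letters).mpr hnd
    simp [h1, h2]
  · have h1 : (PySem.Set.ofList letters).length ≠ letters.length :=
      fun h => hnd ((pv_ofList_len_iff letters).mp h)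
    have h2 : pvAdjDup (PySem.List.sorted letters (fun x => x) false) = true := by
      by_contra h
      exact hnd ((pvAdjDup_sorted_iff letters).mp (by simpa using h))
    simp [h2, Ne.symm h1]
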